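-- pv_equiv track=rewrite | github.com/ausenk/code-wars | Python/next_biggest_number/next_biggest_number.py | nextBiggestNumber
-- ===== SOURCE A (Python) =====
-- def nextBiggestNumber(num: int):
--     '''
--     This function takes a positive integer and returns
--     the next bigger number that can be formed by rearranging its digits.
--     '''
--     digits = []
--     for x in iter(str(num)):
--         digits.append(x)
--
--     digits.sort()
--
--     k = 0
--     biggest_num = 0
--     for x in digits:
--         biggest_num += int(x) * 10 ** k
--         k += 1
--
--     return biggest_num
-- ===== SOURCE B (Python) =====
-- def nextBiggestNumber(num: int):
--     counts = [0] * 10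
--     for c in str(num):
--         counts[int(c)] += 1
--     result = 0
--     for d in range(9, -1, -1):
--         for _ in range(counts[d]):
--             result = result * 10 + d
--     return result
-- ===== Notes on version B (the rewrite author's own statement) =====
-- stated objective: alternative
-- what changed: Replaces the comparison sort of the digit characters plus a positional power-of-ten accumulation with a counting sort: a ten-entry tally of digit occurrences built in one pass, then the result folded digit-by-digit in descending digit order.
import Mathlib
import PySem

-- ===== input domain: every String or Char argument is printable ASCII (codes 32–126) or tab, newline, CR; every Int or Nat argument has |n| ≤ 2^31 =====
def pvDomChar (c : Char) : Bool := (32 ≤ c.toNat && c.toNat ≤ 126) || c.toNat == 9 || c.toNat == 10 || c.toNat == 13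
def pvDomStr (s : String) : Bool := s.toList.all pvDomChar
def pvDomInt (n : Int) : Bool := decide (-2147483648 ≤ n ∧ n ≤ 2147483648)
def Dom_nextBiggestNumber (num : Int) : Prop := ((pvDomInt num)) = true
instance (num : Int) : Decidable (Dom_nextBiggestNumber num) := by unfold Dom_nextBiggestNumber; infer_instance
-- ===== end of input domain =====

-- B replaces A's comparison sort of the digit characters (plus positional 10^k accumulation)
-- by a counting sort: a ten-entry digit tally built in one pass, then the result folded in descending digit order.


-- ===== PORT A =====
def nextBiggestNumber (num : Int) : Int :=
  let digits := (PySem.Int.toChars num).foldl (fun acc x => acc ++ [x]) ([] : List Char)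
  let digits := PySem.List.sorted digits (fun x => x) false
  (digits.foldl (fun (st : Int × Int) x =>
      (st.1 + 1, st.2 + (PySem.Int.ofChars? [x]).getD 0 * 10 ^ st.1.toNat)) ((0:Int), (0:Int))).2

-- ===== PORT B =====
def nextBiggestNumber_alt (num : Int) : Int :=
  let counts : List Int := (PySem.Int.toChars num).foldl
    (fun cnt c =>
      let i := (PySem.Int.ofChars? [c]).getD 0
      cnt.set i.toNat ((PySem.List.pyGet? cnt i).getD 0 + 1))
    (PySem.List.pyRepeat [0] 10)
  (PySem.List.pyRange 9 (-1) (-1)).foldl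
    (fun result d =>
      (PySem.List.pyRange 0 ((PySem.List.pyGet? counts d).getD 0) 1).foldl
        (fun r _ => r * 10 + d) result)
    0

-- ===== PRECONDITION & SPEC =====
-- Pre_ excludes negative num, on which both A and B raise ValueError (int('-') on the sign character).
def Pre_nextBiggestNumber (num : Int) : Prop := 0 ≤ num
instance (num : Int) : Decidable (Pre_nextBiggestNumber num) := by unfold Pre_nextBiggestNumber; infer_instance
def pvWitness_nextBiggestNumber : Int := 1203

def Spec_nextBiggestNumber (num : Int) (out : Int) : Prop := out = nextBiggestNumber_alt num
instance (num : Int) (out : Int) : Decidable (Spec_nextBiggestNumber num out) := by unfold Spec_nextBiggestNumber; infer_instance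

-- ===== CLAIM (what is proved, stated in full; the proofs are below) =====
def Claim_equal_nextBiggestNumber : Prop := ∀ (num : Int), Dom_nextBiggestNumber num → Pre_nextBiggestNumber num → Spec_nextBiggestNumber num (nextBiggestNumber num)

-- ===== LEMMAS AND PROOFS =====

/-- A character is a decimal digit '0'..'9'. -/
def pvIsDigit (c : Char) : Prop := 48 ≤ c.toNat ∧ c.toNat ≤ 57

/-- int(c) for a single character, as both ports compute it. -/
def pvVal (c : Char) : Int := (PySem.Int.ofChars? [c]).getD 0

lemma pv_digitChar (m : Nat) (h : m < 10) : pvIsDigit (Nat.digitChar m) := by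
  interval_cases m <;> constructor <;> decide

lemma pv_toDigitsCore_digits : ∀ (fuel n : Nat) (l : List Char),
    (∀ c ∈ l, pvIsDigit c) → ∀ c ∈ Nat.toDigitsCore 10 fuel n l, pvIsDigit c := by
  intro fuel
  induction fuel with
  | zero => intro n l hl; simpa [Nat.toDigitsCore] using hl
  | succ f ih =>
    intro n l hl
    simp only [Nat.toDigitsCore]
    split
    · intro c hc
      rcases List.mem_cons.mp hc with h | h
      · subst h; exact pv_digitChar _ (Nat.mod_lt _ (by norm_num))
      · exact hl c h
    · exact ih _ _ (by
        intro c hc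
        rcases List.mem_cons.mp hc with h | h
        · subst h; exact pv_digitChar _ (Nat.mod_lt _ (by norm_num))
        · exact hl c h)

lemma pv_toDigits_digits (n : Nat) : ∀ c ∈ Nat.toDigits 10 n, pvIsDigit c :=
  pv_toDigitsCore_digits (n+1) n [] (by simp)

lemma pv_ofChars_digit (c : Char) (h : pvIsDigit c) :
    PySem.Int.ofChars? [c] = some ((c.toNat : Int) - 48) := by
  obtain ⟨h1, h2⟩ := h
  have hc : c = Char.ofNat c.toNat := by rw [Char.ofNat_toNat]
  set m := c.toNat with hm
  interval_cases m <;> (rw [hc]; decide)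

/-- value of a digit list, least-significant digit first. -/
def pvLsd : List Int → Int
  | [] => 0
  | v :: vs => v + 10 * pvLsd vs

lemma pv_lsd_eq_msd_reverse : ∀ vs : List Int,
    pvLsd vs = vs.reverse.foldl (fun r d => r * 10 + d) 0 := by
  intro vs
  induction vs with
  | nil => rfl
  | cons v vs ih =>
    simp [pvLsd, ih, List.foldl_append]
    ring

lemma pv_A_fold : ∀ (xs : List Char) (k b : Int), 0 ≤ k →
    (xs.foldl (fun (st : Int × Int) x =>
      (st.1 + 1, st.2 + (PySem.Int.ofChars? [x]).getD 0 * 10 ^ st.1.toNat)) (k, b)).2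
      = b + 10 ^ k.toNat * pvLsd (xs.map pvVal) := by
  intro xs
  induction xs with
  | nil => intro k b _; simp [pvLsd]
  | cons x xs ih =>
    intro k b hk
    simp only [List.foldl_cons, List.map_cons, pvLsd]
    rw [ih (k+1) _ (by omega)]
    have hkn : (k+1).toNat = k.toNat + 1 := by omega
    rw [hkn, pow_succ]
    show b + pvVal x * 10 ^ k.toNat + 10 ^ k.toNat * 10 * pvLsd (xs.map pvVal)
        = b + 10 ^ k.toNat * (pvVal x + 10 * pvLsd (xs.map pvVal))
    ring

/-- invariant of B's counting loop. -/
lemma pv_counts : ∀ (cs : List Char) (cnt : List Int), cnt.length = 10 →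
    (∀ c ∈ cs, pvIsDigit c) →
    (cs.foldl (fun cnt c =>
      let i := (PySem.Int.ofChars? [c]).getD 0
      cnt.set i.toNat ((PySem.List.pyGet? cnt i).getD 0 + 1)) cnt).length = 10 ∧
    ∀ d : Nat, d < 10 →
      ((cs.foldl (fun cnt c =>
        let i := (PySem.Int.ofChars? [c]).getD 0
        cnt.set i.toNat ((PySem.List.pyGet? cnt i).getD 0 + 1)) cnt)[d]?).getD 0
        = (cnt[d]?).getD 0 + ((cs.map pvVal).count (d : Int) : Int) := by
  intro cs
  induction cs with
  | nil => intro cnt hlen _; exact ⟨hlen, by simp⟩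
  | cons c cs ih =>
    intro cnt hlen hdig
    obtain ⟨h1, h2⟩ := hdig c (List.mem_cons_self ..)
    have hval : (PySem.Int.ofChars? [c]).getD 0 = (c.toNat : Int) - 48 := by
      rw [pv_ofChars_digit c ⟨h1, h2⟩]; rfl
    have hv : pvVal c = (c.toNat : Int) - 48 := hval
    have hi : ((PySem.Int.ofChars? [c]).getD 0).toNat = c.toNat - 48 := by
      rw [hval]; omega
    have hlt : c.toNat - 48 < 10 := by omega
    have hget : PySem.List.pyGet? cnt ((PySem.Int.ofChars? [c]).getD 0)
        = cnt[c.toNat - 48]? := by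
      rw [PySem.List.pyGet?_of_nonneg cnt (by rw [hval]; omega), hi]
    simp only [List.foldl_cons]
    have hset : (cnt.set ((PySem.Int.ofChars? [c]).getD 0).toNat
        ((PySem.List.pyGet? cnt ((PySem.Int.ofChars? [c]).getD 0)).getD 0 + 1)).length = 10 := by
      simp [hlen]
    obtain ⟨ihl, ihd⟩ := ih _ hset (fun x hx => hdig x (List.mem_cons_of_mem _ hx))
    refine ⟨ihl, ?_⟩
    intro d hd
    rw [ihd d hd, hi, hget]
    rw [List.getElem?_set]
    rw [List.getElem?_eq_getElem (by omega : d < cnt.length)]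
    rw [List.getElem?_eq_getElem (by omega : c.toNat - 48 < cnt.length)]
    simp only [List.map_cons, List.count_cons, hv, hlen, hlt]
    by_cases hcase : c.toNat - 48 = d
    · have heq : ((c.toNat : Int) - 48 = (d : Int)) := by omega
      subst hcase
      simp [heq]
      ring
    · have hne : ¬((c.toNat : Int) - 48 = (d : Int)) := by omega
      simp [hcase, hne]

lemma pv_inner_fold {β : Type} (d : Int) : ∀ (l : List β) (r : Int),
    l.foldl (fun r _ => r * 10 + d) r
      = (List.replicate l.length d).foldl (fun r x => r * 10 + x) r := by
  intro l
  induction l with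
  | nil => intro r; rfl
  | cons x l ih => intro r; simp [List.replicate_succ, ih]

/-- one iteration of B's emit loop at digit d. -/
lemma pv_block (counts : List Int) (d : Int) (hd0 : 0 ≤ d) (n : Nat)
    (hn : (counts[d.toNat]?).getD 0 = (n : Int)) (r : Int) :
    (PySem.List.pyRange 0 ((PySem.List.pyGet? counts d).getD 0) 1).foldl
        (fun r _ => r * 10 + d) r
      = (List.replicate n d).foldl (fun r x => r * 10 + x) r := by
  rw [PySem.List.pyGet?_of_nonneg counts hd0, hn]
  rw [show PySem.List.pyRange 0 (n : Int) 1 = PySem.List.pyRange 0 (n : Int) from rfl]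
  rw [PySem.List.pyRange_zero_natCast n, pv_inner_fold]
  simp

/-- blocks of equal digits emitted along a descending digit list stay descending. -/
lemma pv_desc_blocks (f : Int → Nat) : ∀ (l : List Int), List.Pairwise (fun a b => -a ≤ -b) l →
    List.Pairwise (fun a b : Int => -a ≤ -b) (l.flatMap (fun d => List.replicate (f d) d)) := by
  intro l
  induction l with
  | nil => intro _; simp
  | cons d l ih =>
    intro hp
    rw [List.flatMap_cons, List.pairwise_append]
    refine ⟨List.pairwise_replicate.mpr (Or.inr le_rfl), ih hp.tail, ?_⟩
    intro a ha b hb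
    rw [List.eq_of_mem_replicate ha]
    obtain ⟨d', hd', hbd'⟩ := List.mem_flatMap.mp hb
    rw [List.eq_of_mem_replicate hbd']
    exact (List.pairwise_cons.mp hp).1 d' hd'

-- ===== VERDICT (by name: the statement is the Claim_ definition above) =====
theorem nextBiggestNumber_spec : Claim_equal_nextBiggestNumber := by
  intro num _ hpre
  have hpre' : (0:Int) ≤ num := hpre
  show nextBiggestNumber num = nextBiggestNumber_alt num
  -- all characters of str(num) are digits
  have hdig : ∀ c ∈ PySem.Int.toChars num, pvIsDigit c := by
    intro c hc
    simp only [PySem.Int.toChars, if_neg (by omega : ¬ num < 0)] at hc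
    exact pv_toDigits_digits _ c hc
  -- notation
  set cs := PySem.Int.toChars num with hcs
  set scs := PySem.List.sorted cs (fun x => x) false with hscs
  set vs := cs.map pvVal with hvs
  set ns : Int → Nat := fun d => vs.count d with hns
  have hb : ∀ v ∈ vs, 0 ≤ v ∧ v ≤ 9 := by
    intro v hv
    obtain ⟨c, hc, rfl⟩ := List.mem_map.mp hv
    obtain ⟨h1, h2⟩ := hdig c hc
    have : pvVal c = (c.toNat : Int) - 48 := by
      simp [pvVal, pv_ofChars_digit c ⟨h1, h2⟩]
    rw [this]; omega
  -- A computes the LSD-first value of the ascending digit list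
  have hA : nextBiggestNumber num = pvLsd (scs.map pvVal) := by
    simp only [nextBiggestNumber]
    rw [PySem.List.foldl_append_singleton_eq_self, List.nil_append]
    rw [pv_A_fold _ 0 0 le_rfl]
    norm_num
    rfl
  -- B computes the MSD-first value of the descending block list
  have hcval : ∀ d : Nat, d < 10 →
      (((cs.foldl (fun cnt c =>
        let i := (PySem.Int.ofChars? [c]).getD 0
        cnt.set i.toNat ((PySem.List.pyGet? cnt i).getD 0 + 1)) (List.replicate 10 (0:Int))))[d]?).getD 0
        = ((ns (d : Int) : Nat) : Int) := by
    intro d hd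
    rw [(pv_counts cs (List.replicate 10 0) (by simp) hdig).2 d hd]
    have h0 : ((List.replicate 10 (0:Int))[d]?).getD 0 = 0 := by
      rw [List.getElem?_replicate]; simp [hd]
    rw [h0, zero_add]
  have hB : nextBiggestNumber_alt num =
      (([9,8,7,6,5,4,3,2,1,0] : List Int).flatMap (fun d => List.replicate (ns d) d)).foldl
        (fun r x => r * 10 + x) 0 := by
    simp only [nextBiggestNumber_alt]
    rw [show PySem.List.pyRepeat [(0:Int)] 10 = List.replicate 10 0 from by
      rw [PySem.List.pyRepeat_singleton]; rfl]
    rw [show PySem.List.pyRange 9 (-1) (-1) = [9,8,7,6,5,4,3,2,1,0] from by decide]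
    simp only [List.flatMap_cons, List.flatMap_nil, List.foldl_cons, List.foldl_nil,
      List.foldl_append, List.append_nil]
    rw [pv_block _ 9 (by norm_num) (ns 9) (by simpa using hcval 9 (by norm_num)),
        pv_block _ 8 (by norm_num) (ns 8) (by simpa using hcval 8 (by norm_num)),
        pv_block _ 7 (by norm_num) (ns 7) (by simpa using hcval 7 (by norm_num)),
        pv_block _ 6 (by norm_num) (ns 6) (by simpa using hcval 6 (by norm_num)),
        pv_block _ 5 (by norm_num) (ns 5) (by simpa using hcval 5 (by norm_num)),
        pv_block _ 4 (by norm_num) (ns 4) (by simpa using hcval 4 (by norm_num)),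
        pv_block _ 3 (by norm_num) (ns 3) (by simpa using hcval 3 (by norm_num)),
        pv_block _ 2 (by norm_num) (ns 2) (by simpa using hcval 2 (by norm_num)),
        pv_block _ 1 (by norm_num) (ns 1) (by simpa using hcval 1 (by norm_num)),
        pv_block _ 0 (by norm_num) (ns 0) (by simpa using hcval 0 (by norm_num))]
  rw [hA, hB, pv_lsd_eq_msd_reverse, ← List.map_reverse]
  -- the two digit sequences coincide
  have heq : (scs.reverse).map pvVal
      = ([9,8,7,6,5,4,3,2,1,0] : List Int).flatMap (fun d => List.replicate (ns d) d) := by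
    have hmem : ∀ c ∈ scs.reverse, pvIsDigit c := by
      intro c hc
      exact hdig c ((PySem.List.sorted_perm cs (fun x => x) false).mem_iff.mp
        (List.mem_reverse.mp hc))
    apply PySem.List.eq_of_perm_of_pairwise_le_of_injective (key := fun x : Int => -x)
      neg_injective
    · -- permutation: both sides are rearrangements of vs
      have p1 : ((scs.reverse).map pvVal).Perm vs :=
        ((List.reverse_perm scs).trans (PySem.List.sorted_perm cs (fun x => x) false)).map pvVal
      have p2 : (([9,8,7,6,5,4,3,2,1,0] : List Int).flatMap
          (fun d => List.replicate (ns d) d)).Perm vs := by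
        rw [List.perm_iff_count]
        intro x
        simp only [List.flatMap_cons, List.flatMap_nil, List.count_append, List.count_replicate,
          List.append_nil]
        by_cases hx : 0 ≤ x ∧ x ≤ 9
        · obtain ⟨hx1, hx2⟩ := hx
          interval_cases x <;> simp [hns]
        · have hnx : x ∉ vs := fun hmem' => hx ⟨(hb x hmem').1, (hb x hmem').2⟩
          rw [List.count_eq_zero_of_not_mem hnx]
          have h : ∀ d : Int, (0 ≤ d ∧ d ≤ 9) → ¬ (d = x) := by
            rintro d hd rfl; exact hx hd
          simp [if_neg (h 9 (by norm_num)), if_neg (h 8 (by norm_num)),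
            if_neg (h 7 (by norm_num)), if_neg (h 6 (by norm_num)),
            if_neg (h 5 (by norm_num)), if_neg (h 4 (by norm_num)),
            if_neg (h 3 (by norm_num)), if_neg (h 2 (by norm_num)),
            if_neg (h 1 (by norm_num)), if_neg (h 0 (by norm_num))]
      exact p1.trans p2.symm
    · -- left side is descending
      have hvals : ∀ c ∈ scs.reverse, pvVal c = (c.toNat : Int) - 48 := by
        intro c hc; simp [pvVal, pv_ofChars_digit c (hmem c hc)]
      rw [List.map_congr_left hvals, List.pairwise_map, List.pairwise_reverse]
      refine (PySem.List.sorted_pairwise cs (fun x => x)).imp ?_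
      intro a b hab
      have : a.toNat ≤ b.toNat := by
        simpa [Char.le_def, UInt32.le_iff_toNat_le] using hab
      omega
    · -- right side is descending
      exact pv_desc_blocks ns _ (by decide)
  rw [heq]
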